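-- pv_equiv track=rewrite | github.com/Ludovicscelles/python-quests | revisions/revisions_2.py | capitalize_certain_vowels
-- ===== SOURCE A (Python) =====
-- def capitalize_certain_vowels(string):
--
--   vowels = "aeiouy"
--   result = ""
--
--   for index, letter in enumerate(string.lower()):
--     if index % 2 == 0 and letter in vowels:
--       result += letter.upper()
--     else:
--       result += letter
--
--   return result
-- ===== SOURCE B (Python) =====
-- def capitalize_certain_vowels(string):
--     low = string.lower()
--     vowels = "aeiouy"
--     evens = low[::2]
--     odds = low[1::2]
--     tev = [c.upper() if c in vowels else c for c in evens]
--     merged = [c for pair in zip(tev, odds) for c in pair]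
--     merged += tev[len(odds):]
--     return ''.join(merged)
-- ===== Notes on version B (the rewrite author's own statement) =====
-- stated objective: alternative
-- what changed: Instead of one indexed loop testing index parity per character, B lowercases once, splits the string into even/odd positional subsequences by slicing, uppercases vowels only in the even slice, and reinterleaves the two slices (zip plus the leftover tail).
import Mathlib
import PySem

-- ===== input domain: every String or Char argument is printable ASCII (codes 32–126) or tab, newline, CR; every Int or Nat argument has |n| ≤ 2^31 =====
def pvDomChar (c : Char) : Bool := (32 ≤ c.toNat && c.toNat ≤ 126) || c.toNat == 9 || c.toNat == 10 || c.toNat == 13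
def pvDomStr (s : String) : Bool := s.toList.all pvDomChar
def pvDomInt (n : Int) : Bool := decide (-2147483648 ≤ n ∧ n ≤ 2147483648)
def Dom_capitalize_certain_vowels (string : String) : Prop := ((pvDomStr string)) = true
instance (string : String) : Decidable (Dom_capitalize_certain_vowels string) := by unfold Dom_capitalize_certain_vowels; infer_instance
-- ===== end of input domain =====

-- B lowercases once, splits into even/odd positional slices, uppercases vowels in the even
-- slice and reinterleaves, instead of A's single indexed loop testing parity per character.


-- ===== PORT A =====
-- 'letter in vowels' with letter a single character is exactly list membership.
def capitalize_certain_vowels (string : String) : String :=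
  let vowels := "aeiouy"
  let result : List Char := []
  let result := (PySem.List.enumerate (PySem.Str.lower string).toList 0).foldl
    (fun result p =>
      if PySem.Int.mod p.1 2 == 0 && vowels.toList.contains p.2 then
        result ++ [PySem.Chars.upperChar p.2]
      else
        result ++ [p.2]) result
  String.ofList result

-- ===== PORT B =====
-- slice? with step 2 is total (step ≠ 0): the .getD [] only makes the computation total.
def capitalize_certain_vowels_alt (string : String) : String :=
  let low := (PySem.Str.lower string).toList
  let vowels := "aeiouy"
  let evens := (PySem.List.slice? low none none 2).getD []
  let odds := (PySem.List.slice? low (some 1) none 2).getD []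
  let tev := evens.map (fun c => if vowels.toList.contains c then PySem.Chars.upperChar c else c)
  let merged := (tev.zip odds).flatMap (fun p => [p.1, p.2])
  let merged := merged ++ PySem.List.slice tev (some (odds.length : Int)) none
  String.ofList merged

-- ===== PRECONDITION & SPEC =====
def Spec_capitalize_certain_vowels (string : String) (out : String) : Prop := out = capitalize_certain_vowels_alt string
instance (string : String) (out : String) : Decidable (Spec_capitalize_certain_vowels string out) := by unfold Spec_capitalize_certain_vowels; infer_instance

-- ===== CLAIM (what is proved, stated in full; the proofs are below) =====
def Claim_equal_capitalize_certain_vowels : Prop := ∀ (string : String), Dom_capitalize_certain_vowels string → Spec_capitalize_certain_vowels string (capitalize_certain_vowels string)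

-- ===== LEMMAS AND PROOFS =====

def pvF (c : Char) : Char :=
  if "aeiouy".toList.contains c then PySem.Chars.upperChar c else c

def pvEvens {α : Type} : List α → List α
  | [] => []
  | [a] => [a]
  | a :: _ :: t => a :: pvEvens t

def pvOdds {α : Type} : List α → List α
  | [] => []
  | [_] => []
  | _ :: b :: t => b :: pvOdds t

-- A's loop, with the accumulator peeled off.
def pvSpecA : List Char → Int → List Char
  | [], _ => []
  | c :: t, s =>
      (if PySem.Int.mod s 2 == 0 && "aeiouy".toList.contains c then PySem.Chars.upperChar c else c)
        :: pvSpecA t (s + 1)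

theorem pvFoldA (l : List Char) (s : Int) (acc : List Char) :
    (PySem.List.enumerate l s).foldl (fun result p =>
      if PySem.Int.mod p.1 2 == 0 && "aeiouy".toList.contains p.2 then
        result ++ [PySem.Chars.upperChar p.2]
      else
        result ++ [p.2]) acc = acc ++ pvSpecA l s := by
  induction l generalizing s acc with
  | nil => simp [PySem.List.enumerate_nil, pvSpecA]
  | cons c t ih =>
      rw [PySem.List.enumerate_cons]
      simp only [List.foldl_cons, ih, pvSpecA]
      split <;> simp

theorem pvSpecA_shift (l : List Char) (s : Int) : pvSpecA l (s + 2) = pvSpecA l s := by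
  induction l generalizing s with
  | nil => rfl
  | cons c t ih =>
      simp only [pvSpecA]
      have hm : PySem.Int.mod (s + 2) 2 = PySem.Int.mod s 2 := by simp [PySem.Int.mod]
      rw [hm, show s + 2 + 1 = s + 1 + 2 by ring, ih]

theorem pvFmEvens (xs : List Char) :
    (List.range ((xs.length + 1) / 2)).filterMap (fun k => xs[2 * k]?) = pvEvens xs := by
  induction xs using pvEvens.induct with
  | case1 => rfl
  | case2 a => simp [List.range_succ, pvEvens]
  | case3 a b t ih =>
      have hlen : ((a :: b :: t).length + 1) / 2 = (t.length + 1) / 2 + 1 := by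
        simp [List.length_cons]; omega
      rw [hlen, List.range_succ_eq_map, List.filterMap_cons, List.filterMap_map]
      have hcomp : (fun k => (a :: b :: t)[2 * k]?) ∘ Nat.succ = fun k => t[2 * k]? := by
        funext k
        simp only [Function.comp]
        have h2 : 2 * Nat.succ k = 2 * k + 1 + 1 := by omega
        rw [h2, List.getElem?_cons_succ, List.getElem?_cons_succ]
      rw [hcomp, ih]
      rfl

theorem pvSliceEvens (xs : List Char) :
    (PySem.List.slice? xs none none 2).getD [] = pvEvens xs := by
  rw [← pvFmEvens xs]
  simp only [PySem.List.slice?, PySem.List.sliceIndices]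
  norm_num
  have hc : (if 0 < xs.length then (((xs.length : Int) + 2 - 1) / 2).toNat else 0)
      = (xs.length + 1) / 2 := by
    split
    · rw [show ((xs.length : Int) + 2 - 1) = ((xs.length + 1 : Nat) : Int) by push_cast; ring,
        show ((2 : Int)) = ((2 : Nat) : Int) by norm_num, ← Int.natCast_div]
      omega
    · omega
  rw [hc]
  apply List.filterMap_congr
  intro k _
  congr 1

theorem pvFmOdds (xs : List Char) :
    (List.range (xs.length / 2)).filterMap (fun k => xs[2 * k + 1]?) = pvOdds xs := by
  induction xs using pvOdds.induct with
  | case1 => rfl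
  | case2 a => simp [pvOdds]
  | case3 a b t ih =>
      have hlen : (a :: b :: t).length / 2 = t.length / 2 + 1 := by
        simp [List.length_cons]; omega
      rw [hlen, List.range_succ_eq_map, List.filterMap_cons, List.filterMap_map]
      have hcomp : (fun k => (a :: b :: t)[2 * k + 1]?) ∘ Nat.succ = fun k => t[2 * k + 1]? := by
        funext k
        simp only [Function.comp]
        have h2 : 2 * Nat.succ k + 1 = 2 * k + 1 + 1 + 1 := by omega
        rw [h2, List.getElem?_cons_succ, List.getElem?_cons_succ]
      rw [hcomp, ih]
      rfl

theorem pvSliceOdds (xs : List Char) :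
    (PySem.List.slice? xs (some 1) none 2).getD [] = pvOdds xs := by
  cases xs with
  | nil => rfl
  | cons a t =>
      rw [← pvFmOdds (a :: t)]
      simp only [PySem.List.slice?, PySem.List.sliceIndices]
      norm_num
      have hc : (if 0 < t.length then (((t.length : Int) + 2 - 1) / 2).toNat else 0)
          = (t.length + 1) / 2 := by
        split
        · rw [show ((t.length : Int) + 2 - 1) = ((t.length + 1 : Nat) : Int) by push_cast; ring,
            show ((2 : Int)) = ((2 : Nat) : Int) by norm_num, ← Int.natCast_div]
          omega
        · omega
      rw [hc]
      apply List.filterMap_congr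
      intro k _
      have hidx : ((1 : Int) + 2 * (k : Int)).toNat = 2 * k + 1 := by omega
      rw [hidx, List.getElem?_cons_succ]

theorem pvMain (l : List Char) :
    pvSpecA l 0 =
      (((pvEvens l).map pvF).zip (pvOdds l)).flatMap (fun p => [p.1, p.2]) ++
        PySem.List.slice ((pvEvens l).map pvF) (some ((pvOdds l).length : Int)) none := by
  rw [PySem.List.slice_from_natCast]
  induction l using pvEvens.induct with
  | case1 => rfl
  | case2 a =>
      simp [pvSpecA, pvEvens, pvOdds, pvF, PySem.Int.mod]
  | case3 a b t ih =>
      simp only [pvSpecA, pvEvens, pvOdds, List.map_cons, List.zip_cons_cons,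
        List.flatMap_cons, List.length_cons, List.drop_succ_cons]
      have h0 : PySem.Int.mod 0 2 = 0 := by simp [PySem.Int.mod]
      have h1 : PySem.Int.mod (0 + 1) 2 = 1 := by simp [PySem.Int.mod]
      rw [h0, h1, show ((0:Int) + 1 + 1) = 0 + 2 by ring, pvSpecA_shift, ih]
      simp [pvF]

-- ===== VERDICT (by name: the statement is the Claim_ definition above) =====
theorem capitalize_certain_vowels_spec : Claim_equal_capitalize_certain_vowels := by
  intro string _
  unfold Spec_capitalize_certain_vowels capitalize_certain_vowels capitalize_certain_vowels_alt
  simp only [pvFoldA, List.nil_append, pvSliceEvens, pvSliceOdds]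
  rw [pvMain]
  rfl
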